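-- pv_equiv track=rewrite | github.com/tti-coin/edge-editing | src/rule.py | search_nearest
-- ===== SOURCE A (Python) =====
-- def search_nearest(sent, pos, priolity='before',
--                    direction='bidirectional'):
--     res_before = False
--     res_after = False
--     if direction == 'bidirectional':
--         dir_before = True
--         dir_after = True
--     elif direction == 'before':
--         dir_before = True
--         dir_after = False
--     elif direction == 'after':
--         dir_before = False
--         dir_after = True
--
--     end_before = not dir_before
--     end_after = not dir_after
--
--     for i in range(1, len(sent)):
--         before = pos - i
--         after = pos + i
--
--         if dir_before and before < 0:
--             end_before = True
--         if dir_after and after > len(sent):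
--             end_after = True
--
--         if end_before and end_after:
--             return -1
--
--         if before >= 0:
--             if sent[before]:
--                 res_before = True and dir_before
--         if after < len(sent):
--             if sent[after]:
--                 res_after = True and dir_after
--
--         if res_before and res_after:
--             if priolity == 'before':
--                 return before
--             elif priolity == 'after':
--                 return after
--
--         if res_before:
--             return before
--         if res_after:
--             return after
--     return -1
-- ===== SOURCE B (Python) =====
-- def search_nearest(sent, pos, priolity='before', direction='bidirectional'):
--     if direction not in ('bidirectional', 'before', 'after'):
--         raise ValueError('unknown direction: %r' % direction)
--     n = len(sent)
--     dir_before = direction != 'after'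
--     dir_after = direction != 'before'
--     before = next((j for j in range(pos - 1, -1, -1) if sent[j]), None) if dir_before else None
--     after = next((j for j in range(pos + 1, n) if sent[j]), None) if dir_after else None
--     if before is None and after is None:
--         return -1
--     if before is None:
--         return after
--     if after is None:
--         return before
--     if pos - before < after - pos:
--         return before
--     if after - pos < pos - before:
--         return after
--     return after if priolity == 'after' else before
-- ===== Notes on version B (the rewrite author's own statement) =====
-- stated objective: simpler
-- what changed: A's single distance-indexed loop with four interacting flag variables is replaced by two independent directional scans (nearest truthy index below pos and above pos) combined afterwards by distance, with priolity used only on ties.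
-- outside the precondition, e.g. on search_nearest([1], 0, 'before', 'x'): A raises UnboundLocalError, B raises ValueError; on search_nearest([1, 1, 1], 5, 'before', 'bidirectional'): A raises IndexError, B raises IndexError; on search_nearest([0, 1], -1, 'before', 'bidirectional'): A returns -1, B returns 1
import Mathlib
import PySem

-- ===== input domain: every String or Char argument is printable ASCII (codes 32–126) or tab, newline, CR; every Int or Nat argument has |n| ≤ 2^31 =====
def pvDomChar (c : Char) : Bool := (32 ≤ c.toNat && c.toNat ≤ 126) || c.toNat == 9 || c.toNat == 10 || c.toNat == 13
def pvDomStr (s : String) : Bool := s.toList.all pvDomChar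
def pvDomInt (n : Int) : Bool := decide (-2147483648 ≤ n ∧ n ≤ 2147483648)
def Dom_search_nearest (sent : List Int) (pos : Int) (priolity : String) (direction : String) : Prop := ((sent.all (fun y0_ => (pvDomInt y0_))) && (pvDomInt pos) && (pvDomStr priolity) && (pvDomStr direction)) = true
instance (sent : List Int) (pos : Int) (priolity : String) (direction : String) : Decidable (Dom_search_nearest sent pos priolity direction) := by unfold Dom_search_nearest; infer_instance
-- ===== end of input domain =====

-- B replaces A's single distance-indexed loop by two independent directional scans
-- (nearest truthy index below pos, nearest above) combined by distance with priolity
-- only on ties; objective: simpler (same O(n) cost, plainer decomposition).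

-- ===== PORT A =====
-- sent[j] for an Int index j (Python would raise outside [-len,len); Pre_ keeps all accesses in range)
def snTruthy (sent : List Int) (j : Int) : Bool := PySem.List.pyGetD sent j 0 != 0

-- the body of A's `for i in range(1, len(sent))` loop, with its four flag variables as state
def snLoop (sent : List Int) (pos : Int) (priolity : String) (db da : Bool) :
    Nat → Int → Bool → Bool → Bool → Bool → Int
  | 0, _, _, _, _, _ => -1
  | fuel+1, i, rb, ra, eb, ea =>
    let before := pos - i
    let after := pos + i
    let eb := if db && decide (before < 0) then true else eb
    let ea := if da && decide (after > (sent.length : Int)) then true else ea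
    if eb && ea then -1
    else
      let rb := if decide (0 ≤ before) && snTruthy sent before then (true && db) else rb
      let ra := if decide (after < (sent.length : Int)) && snTruthy sent after then (true && da) else ra
      if rb && ra && priolity == "before" then before
      else if rb && ra && priolity == "after" then after
      else if rb then before
      else if ra then after
      else snLoop sent pos priolity db da fuel (i+1) rb ra eb ea

def search_nearest (sent : List Int) (pos : Int) (priolity : String) (direction : String) : Int :=
  if direction == "bidirectional" then
    snLoop sent pos priolity true true (sent.length - 1) 1 false false false false
  else if direction == "before" then
    snLoop sent pos priolity true false (sent.length - 1) 1 false false false true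
  else if direction == "after" then
    snLoop sent pos priolity false true (sent.length - 1) 1 false false true false
  else -1  -- Python raises UnboundLocalError here; excluded by Pre_

-- ===== PORT B =====
-- first truthy index among j, j-1, … (fuel many candidates; B's `next(j for j in range(pos-1,-1,-1) …)`;
-- pyGet? is exact for Python's indexing, including the negative indices B can reach outside Pre_)
def snScanDown (sent : List Int) : Nat → Int → Option Int
  | 0, _ => none
  | f+1, j => if (PySem.List.pyGet? sent j).getD 0 ≠ 0 then some j else snScanDown sent f (j-1)

-- first truthy index among j, j+1, … (fuel many candidates; B's `next(j for j in range(pos+1,n) …)`)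
def snScanUp (sent : List Int) : Nat → Int → Option Int
  | 0, _ => none
  | f+1, j => if (PySem.List.pyGet? sent j).getD 0 ≠ 0 then some j else snScanUp sent f (j+1)

def search_nearest_alt (sent : List Int) (pos : Int) (priolity : String) (direction : String) : Int :=
  if !(direction == "bidirectional" || direction == "before" || direction == "after") then
    -1  -- Python B raises ValueError here; excluded by Pre_
  else
    let db := direction != "after"
    let da := direction != "before"
    let before : Option Int := if db then snScanDown sent pos.toNat (pos - 1) else none
    let after : Option Int := if da then snScanUp sent ((sent.length : Int) - pos - 1).toNat (pos + 1) else none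
    match before, after with
    | none, none => -1
    | none, some a => a
    | some b, none => b
    | some b, some a =>
      if pos - b < a - pos then b
      else if a - pos < pos - b then a
      else if priolity == "after" then a else b

-- ===== PRECONDITION & SPEC =====
-- Pre_ restricts to the function's natural domain: a recognised direction and a position
-- inside the sentence (0 ≤ pos < len).  Outside it A raises (UnboundLocalError for any other
-- direction string, IndexError for pos > len on sentences of length ≥ 2) or, for negative
-- pos and pos = len, returns values produced by negative-index wraparound / a truncated scan,
-- which are outside the function's intended use.
def Pre_search_nearest (sent : List Int) (pos : Int) (priolity : String) (direction : String) : Prop :=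
  (direction = "bidirectional" ∨ direction = "before" ∨ direction = "after") ∧
  0 ≤ pos ∧ pos < (sent.length : Int)
instance (sent : List Int) (pos : Int) (priolity : String) (direction : String) : Decidable (Pre_search_nearest sent pos priolity direction) := by unfold Pre_search_nearest; infer_instance

def pvWitness_search_nearest : List Int × Int × String × String := ([1, 0, 0, 2], 2, "before", "bidirectional")

def Spec_search_nearest (sent : List Int) (pos : Int) (priolity : String) (direction : String) (out : Int) : Prop := out = search_nearest_alt sent pos priolity direction
instance (sent : List Int) (pos : Int) (priolity : String) (direction : String) (out : Int) : Decidable (Spec_search_nearest sent pos priolity direction out) := by unfold Spec_search_nearest; infer_instance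

-- ===== CLAIM (what is proved, stated in full; the proofs are below) =====
def Claim_equal_search_nearest : Prop := ∀ (sent : List Int) (pos : Int) (priolity : String) (direction : String), Dom_search_nearest sent pos priolity direction → Pre_search_nearest sent pos priolity direction → Spec_search_nearest sent pos priolity direction (search_nearest sent pos priolity direction)

-- ===== LEMMAS AND PROOFS =====

-- B's combination applied to the scans that remain from distance i outward
def snCombineAt (sent : List Int) (pos : Int) (priolity : String) (db da : Bool) (i : Int) : Int :=
  match (if db then snScanDown sent (pos - i + 1).toNat (pos - i) else none),
        (if da then snScanUp sent ((sent.length : Int) - pos - i).toNat (pos + i) else none) with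
  | none, none => -1
  | none, some a => a
  | some b, none => b
  | some b, some a =>
    if pos - b < a - pos then b
    else if a - pos < pos - b then a
    else if priolity == "after" then a else b

lemma snScanDown_le (sent : List Int) (f : Nat) (j b : Int) (h : snScanDown sent f j = some b) : b ≤ j := by
  induction f generalizing j with
  | zero => simp [snScanDown] at h
  | succ f ih =>
    simp only [snScanDown] at h
    split at h
    · simp only [Option.some.injEq] at h; omega
    · have := ih _ h; omega

lemma snScanUp_ge (sent : List Int) (f : Nat) (j a : Int) (h : snScanUp sent f j = some a) : j ≤ a := by
  induction f generalizing j with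
  | zero => simp [snScanUp] at h
  | succ f ih =>
    simp only [snScanUp] at h
    split at h
    · simp only [Option.some.injEq] at h; omega
    · have := ih _ h; omega

lemma snLoop_eq (sent : List Int) (pos : Int) (priolity : String) (db da : Bool)
    (fuel : Nat) (i : Int) (eb ea : Bool)
    (hi : 1 ≤ i) (hn : i + fuel = (sent.length : Int))
    (hp0 : 0 ≤ pos) (hpn : pos < (sent.length : Int))
    (heb : eb = (!db || decide (pos < i - 1)))
    (hea : ea = (!da || decide ((sent.length : Int) < pos + (i - 1)))) :
    snLoop sent pos priolity db da fuel i false false eb ea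
      = snCombineAt sent pos priolity db da i := by
  induction fuel generalizing i eb ea with
  | zero =>
    have h1 : (pos - i + 1).toNat = 0 := by omega
    have h2 : ((sent.length : Int) - pos - i).toNat = 0 := by omega
    simp [snLoop, snCombineAt, h1, h2, snScanDown, snScanUp]
  | succ fuel ih =>
    simp only [snLoop]
    have hEB : (if db && decide (pos - i < 0) then true else eb) = (!db || decide (pos < i)) := by
      cases db with
      | false => simpa using heb
      | true =>
        by_cases h : pos - i < 0
        · have h2 : pos < i := by omega
          simp [h, h2]
        · have h2 : ¬ (pos < i - 1) := by omega
          have h3 : ¬ (pos < i) := by omega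
          simp [h, heb, h2, h3]
    have hEA : (if da && decide (pos + i > (sent.length : Int)) then true else ea)
        = (!da || decide ((sent.length : Int) < pos + i)) := by
      cases da with
      | false => simpa using hea
      | true =>
        by_cases h : pos + i > (sent.length : Int)
        · have h2 : (sent.length : Int) < pos + i := by omega
          simp [h, h2]
        · have h2 : ¬ ((sent.length : Int) < pos + (i - 1)) := by omega
          have h3 : ¬ ((sent.length : Int) < pos + i) := by omega
          simp [h, hea, h2, h3]
    rw [hEB, hEA]
    -- Python's sent[j], port A's pyGetD and port B's pyGet? agree on in-range indices
    have hpg : ∀ j : Int, 0 ≤ j → j < (sent.length : Int) →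
        (PySem.List.pyGet? sent j).getD 0 = sent[j.toNat]?.getD 0 := by
      intro j h0 hl
      rw [PySem.List.pyGet?_eq_some_getElem sent h0 hl,
        List.getElem?_eq_getElem (show j.toNat < sent.length by omega)]
    have htr : ∀ j : Int, 0 ≤ j → j < (sent.length : Int) →
        snTruthy sent j = decide (sent[j.toNat]?.getD 0 ≠ 0) := by
      intro j h0 hl
      have h2 : PySem.List.pyGetD sent j 0 = sent[j.toNat]'(by omega) :=
        PySem.List.pyGetD_eq_getElem sent 0 h0 hl
      simp [snTruthy, h2, bne, List.getElem?_eq_getElem (show j.toNat < sent.length by omega)]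
      by_cases h : sent[j.toNat]'(by omega) = 0 <;> simp [h]
    by_cases hend : ((!db || decide (pos < i)) && (!da || decide ((sent.length : Int) < pos + i))) = true
    · rw [if_pos hend]
      have hdn : (if db then snScanDown sent (pos - i + 1).toNat (pos - i) else none) = none := by
        cases db with
        | false => rfl
        | true =>
          simp only [Bool.not_true, Bool.false_or, Bool.and_eq_true, decide_eq_true_eq] at hend
          have h1 : (pos - i + 1).toNat = 0 := by omega
          simp [h1, snScanDown]
      have hup : (if da then snScanUp sent ((sent.length : Int) - pos - i).toNat (pos + i) else none) = none := by
        cases da with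
        | false => rfl
        | true =>
          simp only [Bool.not_true, Bool.false_or, Bool.and_eq_true, decide_eq_true_eq] at hend
          have h2 : ((sent.length : Int) - pos - i).toNat = 0 := by omega
          simp [h2, snScanUp]
      simp [snCombineAt, hdn, hup]
    · rw [if_neg (by simpa using hend)]
      by_cases hHB : db = true ∧ i ≤ pos ∧ sent[(pos - i).toNat]?.getD 0 ≠ 0
      · -- before-side hit at distance i
        have hrb : (if decide (0 ≤ pos - i) && snTruthy sent (pos - i) then (true && db) else false) = true := by
          rw [htr (pos - i) (by omega) (by omega)]
          simp [hHB.2.2, hHB.1, hHB.2.1, (show (0:Int) ≤ pos - i by omega)]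
        have hdn : (if db then snScanDown sent (pos - i + 1).toNat (pos - i) else none) = some (pos - i) := by
          have h1 : (pos - i + 1).toNat = (pos - i).toNat + 1 := by omega
          rw [hHB.1, if_pos rfl, h1]
          simp only [snScanDown]
          rw [hpg (pos - i) (by omega) (by omega), if_pos hHB.2.2]
        by_cases hHA : da = true ∧ pos + i < (sent.length : Int) ∧ sent[(pos + i).toNat]?.getD 0 ≠ 0
        · -- both hit: tie at distance i, priolity decides
          have hra : (if decide (pos + i < (sent.length : Int)) && snTruthy sent (pos + i) then (true && da) else false) = true := by
            rw [htr (pos + i) (by omega) hHA.2.1]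
            simp [hHA.2.2, hHA.1, hHA.2.1]
          have hup : (if da then snScanUp sent ((sent.length : Int) - pos - i).toNat (pos + i) else none) = some (pos + i) := by
            have h2 : ((sent.length : Int) - pos - i).toNat = ((sent.length : Int) - pos - (i + 1)).toNat + 1 := by omega
            rw [hHA.1, if_pos rfl, h2]
            simp only [snScanUp]
            rw [hpg (pos + i) (by omega) (by omega), if_pos hHA.2.2]
          rw [hrb, hra]
          simp only [snCombineAt, hdn, hup]
          have hlt : ¬ (pos - (pos - i) < pos + i - pos) := by omega
          have hlt2 : ¬ (pos + i - pos < pos - (pos - i)) := by omega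
          by_cases hpr : priolity = "before"
          · simp [hpr, hlt, hlt2]
          · by_cases hpr2 : priolity = "after"
            · simp [hpr2, hlt, hlt2]
            · simp [hpr, hpr2, hlt, hlt2]
        · -- only the before side hits at distance i
          have hra : (if decide (pos + i < (sent.length : Int)) && snTruthy sent (pos + i) then (true && da) else false) = false := by
            by_cases hr : pos + i < (sent.length : Int)
            · rw [htr (pos + i) (by omega) hr]
              by_cases hv : sent[(pos + i).toNat]?.getD 0 ≠ 0
              · cases da with
                | false => simp
                | true => exact absurd ⟨rfl, hr, hv⟩ hHA
              · simp [hv, hr]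
            · simp [hr]
          rw [hrb, hra]
          simp only [Bool.true_and, Bool.and_false, Bool.false_and, if_false, Bool.false_eq_true,
            if_true, Bool.and_self]
          rcases hupv : (if da then snScanUp sent ((sent.length : Int) - pos - i).toNat (pos + i) else none) with _ | a
          · simp [snCombineAt, hdn, hupv]
          · -- the after candidate is strictly farther
            have hupv0 := hupv
            have hda : da = true := by
              cases da with
              | false => simp at hupv
              | true => rfl
            subst hda
            rw [if_pos rfl] at hupv
            rw [if_pos rfl] at hupv0
            have hr : pos + i < (sent.length : Int) := by
              by_contra hcon
              have h0 : ((sent.length : Int) - pos - i).toNat = 0 := by omega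
              rw [h0] at hupv; simp [snScanUp] at hupv
            have h2 : ((sent.length : Int) - pos - i).toNat = ((sent.length : Int) - pos - (i + 1)).toNat + 1 := by omega
            rw [h2] at hupv
            simp only [snScanUp] at hupv
            rw [hpg (pos + i) (by omega) (by omega)] at hupv
            have hagt : pos + i < a := by
              split at hupv
              · rename_i hv
                exfalso
                exact hHA ⟨rfl, hr, hv⟩
              · have := snScanUp_ge sent _ _ _ hupv; omega
            simp only [snCombineAt, hdn, hupv0, eq_self_iff_true, if_true]
            rw [if_pos (show pos - (pos - i) < a - pos by omega)]
      · -- no before-side hit at distance i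
        have hrb : (if decide (0 ≤ pos - i) && snTruthy sent (pos - i) then (true && db) else false) = false := by
          by_cases hr : 0 ≤ pos - i
          · rw [htr (pos - i) hr (by omega)]
            by_cases hv : sent[(pos - i).toNat]?.getD 0 ≠ 0
            · cases db with
              | false => simp
              | true => exact absurd ⟨rfl, by omega, hv⟩ hHB
            · simp [hv, hr]
          · have hr2 : ¬ i ≤ pos := by omega
            simp [hr2]
        have hdn : (if db then snScanDown sent (pos - i + 1).toNat (pos - i) else none)
            = (if db then snScanDown sent (pos - (i+1) + 1).toNat (pos - (i+1)) else none) := by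
          cases db with
          | false => rfl
          | true =>
            simp only [if_true]
            by_cases hr : i ≤ pos
            · have h1 : (pos - i + 1).toNat = (pos - i).toNat + 1 := by omega
              have hv : ¬ sent[(pos - i).toNat]?.getD 0 ≠ 0 := fun h => hHB ⟨rfl, hr, h⟩
              have h3 : (pos - (i+1) + 1).toNat = (pos - i).toNat := by omega
              rw [h1, h3]
              simp only [snScanDown]
              rw [hpg (pos - i) (by omega) (by omega), if_neg hv]
              have e : pos - i - 1 = pos - (i + 1) := by ring
              rw [e]
            · have h1 : (pos - i + 1).toNat = 0 := by omega
              have h3 : (pos - (i+1) + 1).toNat = 0 := by omega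
              rw [h1, h3]
              simp [snScanDown]
        by_cases hHA : da = true ∧ pos + i < (sent.length : Int) ∧ sent[(pos + i).toNat]?.getD 0 ≠ 0
        · -- only the after side hits at distance i
          have hra : (if decide (pos + i < (sent.length : Int)) && snTruthy sent (pos + i) then (true && da) else false) = true := by
            rw [htr (pos + i) (by omega) hHA.2.1]
            simp [hHA.2.2, hHA.1, hHA.2.1]
          have hup : (if da then snScanUp sent ((sent.length : Int) - pos - i).toNat (pos + i) else none) = some (pos + i) := by
            have h2 : ((sent.length : Int) - pos - i).toNat = ((sent.length : Int) - pos - (i + 1)).toNat + 1 := by omega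
            rw [hHA.1, if_pos rfl, h2]
            simp only [snScanUp]
            rw [hpg (pos + i) (by omega) (by omega), if_pos hHA.2.2]
          rw [hrb, hra]
          simp only [Bool.false_and, Bool.and_self, if_false, Bool.false_eq_true, if_true, Bool.true_and]
          rcases hdnv : (if db then snScanDown sent (pos - i + 1).toNat (pos - i) else none) with _ | b
          · simp [snCombineAt, hdnv, hup]
          · -- the before candidate is strictly farther
            have hdnv0 := hdnv
            have hdb : db = true := by
              cases db with
              | false => simp at hdnv
              | true => rfl
            subst hdb
            rw [if_pos rfl] at hdnv
            rw [if_pos rfl] at hdnv0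
            have hr : i ≤ pos := by
              by_contra hcon
              have h0 : (pos - i + 1).toNat = 0 := by omega
              rw [h0] at hdnv; simp [snScanDown] at hdnv
            have h1 : (pos - i + 1).toNat = (pos - i).toNat + 1 := by omega
            rw [h1] at hdnv
            simp only [snScanDown] at hdnv
            rw [hpg (pos - i) (by omega) (by omega)] at hdnv
            have hblt : b < pos - i := by
              split at hdnv
              · rename_i hv
                exfalso
                exact hHB ⟨rfl, hr, hv⟩
              · have := snScanDown_le sent _ _ _ hdnv; omega
            simp only [snCombineAt, hdnv0, hup, eq_self_iff_true, if_true]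
            rw [if_neg (show ¬ (pos - b < pos + i - pos) by omega),
              if_pos (show pos + i - pos < pos - b by omega)]
        · -- no hit at distance i on either enabled side: step to distance i+1
          have hra : (if decide (pos + i < (sent.length : Int)) && snTruthy sent (pos + i) then (true && da) else false) = false := by
            by_cases hr : pos + i < (sent.length : Int)
            · rw [htr (pos + i) (by omega) hr]
              by_cases hv : sent[(pos + i).toNat]?.getD 0 ≠ 0
              · cases da with
                | false => simp
                | true => exact absurd ⟨rfl, hr, hv⟩ hHA
              · simp [hv, hr]
            · simp [hr]
          rw [hrb, hra]
          simp only [Bool.false_and, Bool.and_self, if_false, Bool.false_eq_true]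
          have hup : (if da then snScanUp sent ((sent.length : Int) - pos - i).toNat (pos + i) else none)
              = (if da then snScanUp sent ((sent.length : Int) - pos - (i+1)).toNat (pos + (i+1)) else none) := by
            cases da with
            | false => rfl
            | true =>
              simp only [if_true]
              by_cases hr : pos + i < (sent.length : Int)
              · have h2 : ((sent.length : Int) - pos - i).toNat = ((sent.length : Int) - pos - (i + 1)).toNat + 1 := by omega
                have hv : ¬ sent[(pos + i).toNat]?.getD 0 ≠ 0 := fun h => hHA ⟨rfl, hr, h⟩
                rw [h2]
                simp only [snScanUp]
                rw [hpg (pos + i) (by omega) (by omega), if_neg hv]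
                have e : pos + i + 1 = pos + (i + 1) := by ring
                rw [e]
              · have h2 : ((sent.length : Int) - pos - i).toNat = 0 := by omega
                have h3 : ((sent.length : Int) - pos - (i+1)).toNat = 0 := by omega
                rw [h2, h3]
                simp [snScanUp]
          have hstep := ih (i+1) (!db || decide (pos < i)) (!da || decide ((sent.length : Int) < pos + i))
            (by omega) (by omega)
            (by have e : i + 1 - 1 = i := by ring
                rw [e])
            (by have e : i + 1 - 1 = i := by ring
                rw [e])
          rw [hstep]
          unfold snCombineAt
          rw [hdn, hup]

-- ===== VERDICT (by name: the statement is the Claim_ definition above) =====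
theorem search_nearest_spec : Claim_equal_search_nearest := by
  unfold Claim_equal_search_nearest
  intro sent pos pr dir _ hpre
  obtain ⟨hdir, hp0, hpn⟩ := hpre
  unfold Spec_search_nearest
  have key : ∀ (db da eb ea : Bool), eb = !db → ea = !da →
      snLoop sent pos pr db da (sent.length - 1) 1 false false eb ea
        = snCombineAt sent pos pr db da 1 := by
    intro db da eb ea hb ha
    apply snLoop_eq sent pos pr db da _ 1 _ _ (by omega) (by omega) hp0 hpn
    · rw [hb, decide_eq_false (show ¬ ((pos : Int) < 1 - 1) by omega)]
      simp
    · rw [ha, decide_eq_false (show ¬ ((sent.length : Int) < pos + (1 - 1)) by omega)]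
      simp
  have e1 : (pos - 1 + 1 : Int) = pos := by ring
  rcases hdir with h | h | h <;> subst h
  · rw [show search_nearest sent pos pr "bidirectional"
        = snLoop sent pos pr true true (sent.length - 1) 1 false false false false from by
      simp [search_nearest]]
    rw [key true true false false rfl rfl]
    simp only [snCombineAt, search_nearest_alt, e1]
    simp
  · rw [show search_nearest sent pos pr "before"
        = snLoop sent pos pr true false (sent.length - 1) 1 false false false true from by
      simp [search_nearest]]
    rw [key true false false true rfl rfl]
    simp only [snCombineAt, search_nearest_alt, e1]
    simp
  · rw [show search_nearest sent pos pr "after"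
        = snLoop sent pos pr false true (sent.length - 1) 1 false false true false from by
      simp [search_nearest]]
    rw [key false true true false rfl rfl]
    simp only [snCombineAt, search_nearest_alt, e1]
    simp
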